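-- pv_equiv track=rewrite | github.com/Gr33nMax/finite_state_machine_projects | translations/translations.py | add_vertical_lines
-- ===== SOURCE A (Python) =====
-- SPECIALS = frozenset("\|.()[]{}*+?-$^")
--
-- def add_vertical_lines(substr: str) -> str:
--     """ Add vertical lines between each character. """
--     tokens = []
--     idx = 0
--     while idx < len(substr):
--         char = substr[idx]
--         if char == '\\' and substr[idx + 1:idx + 2] in SPECIALS:
--             tokens.append(substr[idx:idx + 2])
--             idx += 1
--         elif char in SPECIALS:
--             tokens.append(f"\\{char}")
--         else:
--             tokens.append(char)
--         idx += 1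
--     return '|'.join(tokens)
-- ===== SOURCE B (Python) =====
-- import re
--
-- SPECIALS = frozenset("\|.()[]{}*+?-$^")
--
-- _TOKEN = re.compile(r'\\[\\|.()\[\]{}*+?\-$^]|[\s\S]')
--
-- def add_vertical_lines(substr: str) -> str:
--     """ Add vertical lines between each character. """
--     tokens = _TOKEN.findall(substr)
--     return '|'.join(t if len(t) == 2 else ('\\' + t if t in SPECIALS else t)
--                     for t in tokens)
-- ===== Notes on version B (the rewrite author's own statement) =====
-- stated objective: idiomatic
-- what changed: Replaces the manual index-skipping while-loop with a one-pass regex tokenization (escaped-pair first, then any single char) followed by a map that escapes lone special characters and a join.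
import Mathlib
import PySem

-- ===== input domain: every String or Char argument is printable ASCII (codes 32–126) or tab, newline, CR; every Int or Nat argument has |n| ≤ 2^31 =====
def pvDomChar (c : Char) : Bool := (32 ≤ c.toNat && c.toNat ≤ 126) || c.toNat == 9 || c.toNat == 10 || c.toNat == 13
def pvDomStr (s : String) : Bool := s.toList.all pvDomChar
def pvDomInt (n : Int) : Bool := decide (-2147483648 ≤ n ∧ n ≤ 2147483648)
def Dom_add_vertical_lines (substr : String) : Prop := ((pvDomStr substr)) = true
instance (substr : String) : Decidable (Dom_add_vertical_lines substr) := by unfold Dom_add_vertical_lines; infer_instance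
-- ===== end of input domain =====

-- B replaces the manual index-skipping while-loop with regex-style tokenization, a map escaping lone specials, and a join (idiomatic).

-- SPECIALS = frozenset("\|.()[]{}*+?-$^")
def SPECIALS : List Char := ['\\', '|', '.', '(', ')', '[', ']', '{', '}', '*', '+', '?', '-', '$', '^']

-- ===== PORT A =====
-- the while-loop of A: idx advances by 1 or 2; tokens accumulated; recursion on remaining length
-- 'substr[idx+1:idx+2] in SPECIALS': true iff the slice is one single special char
def sliceInSpecials (l : List Char) : Bool :=
  match l with
  | [c2] => c2 ∈ SPECIALS
  | _ => false

def addVLLoopA (s : List Char) (fuel : Nat) (idx : Nat) (tokens : List String) : List String :=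
  match fuel with
  | 0 => tokens
  | fuel + 1 =>
    if h : idx < s.length then
      let char := s[idx]
      if char = '\\' ∧ sliceInSpecials (PySem.List.slice s (some ((idx : Int) + 1)) (some ((idx : Int) + 2))) then
        -- tokens.append(substr[idx:idx + 2]); idx += 2 (the += 1 inside plus the trailing += 1)
        addVLLoopA s fuel (idx + 2) (tokens ++ [String.ofList (PySem.List.slice s (some (idx : Int)) (some ((idx : Int) + 2)))])
      else if char ∈ SPECIALS then
        addVLLoopA s fuel (idx + 1) (tokens ++ [String.ofList ['\\', char]])
      else
        addVLLoopA s fuel (idx + 1) (tokens ++ [String.ofList [char]])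
    else tokens

def add_vertical_lines (substr : String) : String :=
  String.intercalate "|" (addVLLoopA substr.toList substr.toList.length 0 [])

-- ===== PORT B =====
-- regex r'\\[...specials...]|[\s\S]': first alternative a backslash followed by a special, else any single char
def tokenizeB : List Char → List (List Char)
  | [] => []
  | [c] => [[c]]
  | c :: c2 :: rest =>
    if c = '\\' ∧ c2 ∈ SPECIALS then [c, c2] :: tokenizeB rest
    else [c] :: tokenizeB (c2 :: rest)

-- t if len(t) == 2 else ('\\' + t if t in SPECIALS else t)
def escTokB (t : List Char) : List Char :=
  if t.length = 2 then t
  else if (match t with | [c] => decide (c ∈ SPECIALS) | _ => false) then '\\' :: t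
  else t

def add_vertical_lines_alt (substr : String) : String :=
  String.intercalate "|" ((tokenizeB substr.toList).map (fun t => String.ofList (escTokB t)))

-- ===== PRECONDITION & SPEC =====
def Spec_add_vertical_lines (substr : String) (out : String) : Prop := out = add_vertical_lines_alt substr
instance (substr : String) (out : String) : Decidable (Spec_add_vertical_lines substr out) := by unfold Spec_add_vertical_lines; infer_instance

-- ===== CLAIM (what is proved, stated in full; the proofs are below) =====
def Claim_equal_add_vertical_lines : Prop := ∀ (substr : String), Dom_add_vertical_lines substr → Spec_add_vertical_lines substr (add_vertical_lines substr)

-- ===== LEMMAS AND PROOFS =====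

theorem slice_one (s : List Char) (idx : Nat) :
    PySem.List.slice s (some ((idx : Int) + 1)) (some ((idx : Int) + 2)) = (s.drop (idx + 1)).take 1 := by
  have h1 : ((idx : Int) + 1) = ((idx + 1 : Nat) : Int) := by push_cast; ring
  have h2 : ((idx : Int) + 2) = ((idx + 2 : Nat) : Int) := by push_cast; ring
  rw [h1, h2, PySem.List.slice_natCast]
  congr 1
  omega

theorem slice_two (s : List Char) (idx : Nat) :
    PySem.List.slice s (some ((idx : Int))) (some ((idx : Int) + 2)) = (s.drop idx).take 2 := by
  have h2 : ((idx : Int) + 2) = ((idx + 2 : Nat) : Int) := by push_cast; ring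
  rw [h2, PySem.List.slice_natCast]
  congr 1
  omega

theorem addVLLoopA_eq (s : List Char) (n : Nat) :
    ∀ (idx : Nat) (tokens : List String), s.length ≤ idx + n →
    addVLLoopA s n idx tokens = tokens ++ (tokenizeB (s.drop idx)).map (fun t => String.ofList (escTokB t)) := by
  induction n with
  | zero =>
    intro idx tokens h
    rw [List.drop_eq_nil_of_le (by omega)]
    simp [addVLLoopA, tokenizeB]
  | succ n ih =>
    intro idx tokens h
    by_cases hlt : idx < s.length
    · rw [addVLLoopA]
      rw [dif_pos hlt]
      simp only [slice_one]
      rw [List.drop_eq_getElem_cons hlt]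
      cases hrest : s.drop (idx + 1) with
      | nil =>
        rw [if_neg (by simp [sliceInSpecials])]
        by_cases hc : s[idx] ∈ SPECIALS
        · rw [if_pos hc, ih (idx + 1) _ (by omega), hrest]
          simp [tokenizeB, escTokB, hc]
        · rw [if_neg hc, ih (idx + 1) _ (by omega), hrest]
          simp [tokenizeB, escTokB, hc]
      | cons c2 rest =>
        by_cases hc : s[idx] = '\\' <;> by_cases hc2 : c2 ∈ SPECIALS
        · rw [if_pos ⟨hc, by simp [sliceInSpecials, hc2]⟩]
          rw [ih (idx + 2) _ (by omega)]
          have hdrop2 : s.drop (idx + 2) = rest := by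
            have : s.drop (idx + 2) = (s.drop (idx + 1)).drop 1 := by
              rw [List.drop_drop]
            rw [this, hrest]; rfl
          rw [hdrop2, slice_two, List.drop_eq_getElem_cons hlt, hrest]
          simp [tokenizeB, escTokB, hc, hc2]
        · rw [if_neg (by simp [sliceInSpecials, hc2])]
          rw [hc]
          rw [if_pos (by decide), ih (idx + 1) _ (by omega), hrest]
          simp [tokenizeB, escTokB, hc2, (by decide : ('\\' : Char) ∈ SPECIALS)]
        · rw [if_neg (by simp [hc])]
          by_cases hsp : s[idx] ∈ SPECIALS
          · rw [if_pos hsp, ih (idx + 1) _ (by omega), hrest]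
            simp [tokenizeB, escTokB, hc, hc2, hsp]
          · rw [if_neg hsp, ih (idx + 1) _ (by omega), hrest]
            simp [tokenizeB, escTokB, hc, hc2, hsp]
        · rw [if_neg (by simp [hc])]
          by_cases hsp : s[idx] ∈ SPECIALS
          · rw [if_pos hsp, ih (idx + 1) _ (by omega), hrest]
            simp [tokenizeB, escTokB, hc, hc2, hsp]
          · rw [if_neg hsp, ih (idx + 1) _ (by omega), hrest]
            simp [tokenizeB, escTokB, hc, hc2, hsp]
    · rw [addVLLoopA, dif_neg hlt, List.drop_eq_nil_of_le (by omega)]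
      simp [tokenizeB]

-- ===== VERDICT (by name: the statement is the Claim_ definition above) =====
theorem add_vertical_lines_spec : Claim_equal_add_vertical_lines := by
  intro substr _
  show _ = _
  rw [add_vertical_lines, add_vertical_lines_alt,
    addVLLoopA_eq substr.toList substr.toList.length 0 [] (by omega)]
  simp
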